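-- pv_equiv track=rewrite | github.com/AmyOlex/Chrono | Chrono/temporalTest.py | hasAMPM
-- ===== SOURCE A (Python) =====
-- def hasAMPM(text):
--
--     #remove all ounctuation except periods
--     punct = "!\"#$%&\'()*+,-/:;<=>?@[]^_`{|}~"
--     text_norm = text.translate(str.maketrans(punct, ' '*len(punct))).strip()
--     #convert to list
--     text_list = text_norm.split(' ')
--
--     #define my day lists
--     am = ["AM","am","A.M.","AM.","a.m.","am."]
--     pm = ["PM","pm","P.M.","p.m.","pm.","PM."]
--
--     ampm = am+pm
--
--     t_flag = False
--     for t in text_list: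
--         answer = next((m for m in ampm if t in m), None)
--         if answer is not None and not t_flag:
--             answer2 = next((m for m in ampm if m in t), None)
--             if answer2 is not None and not t_flag:
--                 t_flag = True
--
--
--     return t_flag
-- ===== SOURCE B (Python) =====
-- def hasAMPM(text):
--     # single left-to-right scan with early return: normalize chars, strip, then
--     # accumulate one token at a time and test exact membership in the marker set
--     PUNCT = "!\"#$%&'()*+,-/:;<=>?@[]^_`{|}~"
--     MARKERS = {"AM", "am", "A.M.", "AM.", "a.m.", "am.",
--                "PM", "pm", "P.M.", "p.m.", "pm.", "PM."}
--     s = ''.join(' ' if c in PUNCT else c for c in text).strip()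
--     token = ''
--     for c in s:
--         if c == ' ':
--             if token in MARKERS:
--                 return True
--             token = ''
--         else:
--             token += c
--     return token in MARKERS
-- ===== Notes on version B (the rewrite author's own statement) =====
-- stated objective: alternative
-- what changed: A splits the normalized text into a token list and, per token, runs two nested substring scans over the 12-marker list; B is a single left-to-right scan that builds one token at a time and tests it for exact membership in a marker set, returning True at the first hit.
import Mathlib
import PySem

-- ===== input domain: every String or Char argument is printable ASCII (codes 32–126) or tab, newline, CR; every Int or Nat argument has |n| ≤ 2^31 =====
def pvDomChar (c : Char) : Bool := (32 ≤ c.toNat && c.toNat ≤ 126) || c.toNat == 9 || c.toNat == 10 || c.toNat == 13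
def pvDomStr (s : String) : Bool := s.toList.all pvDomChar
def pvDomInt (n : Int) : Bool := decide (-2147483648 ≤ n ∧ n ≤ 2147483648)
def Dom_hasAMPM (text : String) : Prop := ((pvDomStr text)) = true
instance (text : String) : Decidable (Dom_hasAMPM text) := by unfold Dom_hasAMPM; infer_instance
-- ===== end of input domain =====

-- B replaces A's split-into-token-list plus two nested substring scans per token by a single
-- left-to-right scan that accumulates one token at a time and tests exact membership in a
-- marker set, returning at the first hit (objective: alternative; same normalization).

-- ===== PORT A =====
def pvPunct : List Char := "!\"#$%&'()*+,-/:;<=>?@[]^_`{|}~".toList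

-- text.translate(str.maketrans(punct, ' '*len(punct))).strip().split(' ')
-- (translate with an all-to-' ' table is a per-char replacement; exact)
def pvTokens (text : String) : List (List Char) :=
  PySem.Chars.splitOn
    (PySem.Chars.strip (text.toList.map (fun c => if c ∈ pvPunct then ' ' else c))) [' ']

def pvAmpm : List (List Char) :=
  ["AM".toList, "am".toList, "A.M.".toList, "AM.".toList, "a.m.".toList, "am.".toList] ++
  ["PM".toList, "pm".toList, "P.M.".toList, "p.m.".toList, "pm.".toList, "PM.".toList]

def hasAMPM (text : String) : Bool :=
  (pvTokens text).foldl
    (fun t_flag t =>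
      let answer := pvAmpm.find? (fun m => PySem.Chars.isIn t m)   -- next((m for m in ampm if t in m), None)
      if answer.isSome && !t_flag then
        let answer2 := pvAmpm.find? (fun m => PySem.Chars.isIn m t) -- next((m for m in ampm if m in t), None)
        if answer2.isSome && !t_flag then true else t_flag
      else t_flag)
    false

-- ===== PORT B =====
def pvMarkers : PySem.Set (List Char) :=
  PySem.Set.ofList ["AM".toList, "am".toList, "A.M.".toList, "AM.".toList, "a.m.".toList, "am.".toList,
                    "PM".toList, "pm".toList, "P.M.".toList, "p.m.".toList, "pm.".toList, "PM.".toList]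

-- the 'for c in s' loop of Source B: current token accumulator, early True on a marker token
def pvScan : List Char → List Char → Bool
  | token, [] => PySem.Set.contains pvMarkers token
  | token, c :: rest =>
      if c = ' ' then
        if PySem.Set.contains pvMarkers token then true else pvScan [] rest
      else pvScan (token ++ [c]) rest

def hasAMPM_alt (text : String) : Bool :=
  pvScan []
    (PySem.Chars.strip
      (text.toList.map (fun c =>
        if c ∈ "!\"#$%&'()*+,-/:;<=>?@[]^_`{|}~".toList then ' ' else c)))

-- ===== PRECONDITION & SPEC =====
def Spec_hasAMPM (text : String) (out : Bool) : Prop := out = hasAMPM_alt text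
instance (text : String) (out : Bool) : Decidable (Spec_hasAMPM text out) := by unfold Spec_hasAMPM; infer_instance

-- ===== CLAIM (what is proved, stated in full; the proofs are below) =====
def Claim_equal_hasAMPM : Prop := ∀ (text : String), Dom_hasAMPM text → Spec_hasAMPM text (hasAMPM text)

-- ===== LEMMAS AND PROOFS =====

-- all infixes of the 12 markers: a concrete pool of candidate tokens for the finite check
def pvAllSubs : List (List Char) := pvAmpm.flatMap List.sublists

-- A's per-token test, abstracted
def pvMatchA (t : List Char) : Bool :=
  (pvAmpm.find? (fun m => PySem.Chars.isIn t m)).isSome &&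
  (pvAmpm.find? (fun m => PySem.Chars.isIn m t)).isSome

theorem pv_step (flag : Bool) (t : List Char) :
    (let answer := pvAmpm.find? (fun m => PySem.Chars.isIn t m)
     if answer.isSome && !flag then
       let answer2 := pvAmpm.find? (fun m => PySem.Chars.isIn m t)
       if answer2.isSome && !flag then true else flag
     else flag) = (flag || pvMatchA t) := by
  unfold pvMatchA
  cases flag <;>
    cases h1 : (pvAmpm.find? (fun m => PySem.Chars.isIn t m)).isSome <;>
    cases h2 : (pvAmpm.find? (fun m => PySem.Chars.isIn m t)).isSome <;>
    simp [h1, h2]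

theorem pv_foldl_step (l : List (List Char)) (b : Bool) :
    l.foldl
      (fun t_flag t =>
        let answer := pvAmpm.find? (fun m => PySem.Chars.isIn t m)
        if answer.isSome && !t_flag then
          let answer2 := pvAmpm.find? (fun m => PySem.Chars.isIn m t)
          if answer2.isSome && !t_flag then true else t_flag
        else t_flag) b = (b || l.any pvMatchA) := by
  induction l generalizing b with
  | nil => simp
  | cons x xs ih => rw [List.foldl_cons, pv_step, ih, List.any_cons, Bool.or_assoc]

-- if t is a substring of some marker then t is in the concrete pool
theorem pv_sub_mem (t : List Char)
    (h : (pvAmpm.find? (fun m => PySem.Chars.isIn t m)).isSome = true) :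
    t ∈ pvAllSubs := by
  rw [List.find?_isSome] at h
  obtain ⟨m, hm, hin⟩ := h
  rw [PySem.Chars.isIn_iff_infix] at hin
  exact List.mem_flatMap.2 ⟨m, hm, List.mem_sublists.2 hin.sublist⟩

-- the decisive finite check: among all substrings of markers, only the markers themselves
-- contain a marker as a substring
set_option maxRecDepth 20000 in
theorem pv_pool_check :
    ∀ s ∈ pvAllSubs,
      pvAmpm.any (fun m => PySem.Chars.isIn m s) = true → s ∈ pvAmpm := by
  decide

set_option maxRecDepth 20000 in
theorem pv_marker_match (t : List Char) (h : t ∈ pvAmpm) : pvMatchA t = true := by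
  fin_cases h <;> decide

theorem pv_match_iff (t : List Char) : pvMatchA t = PySem.Set.contains pvMarkers t := by
  rw [Bool.eq_iff_iff, PySem.Set.contains_iff, pvMarkers, PySem.Set.mem_ofList]
  constructor
  · intro h
    rw [pvMatchA, Bool.and_eq_true] at h
    obtain ⟨h1, h2⟩ := h
    have hpool := pv_sub_mem t h1
    rw [List.find?_isSome, ← List.any_eq_true] at h2
    exact pv_pool_check t hpool h2
  · intro h
    exact pv_marker_match t h

-- fuel-free mirror of PySem.Chars.splitOn.go for the single-char separator [' ']
def pvSplit : List Char → List Char → List (List Char) → List (List Char)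
  | [], cur, acc => (cur.reverse :: acc).reverse
  | c :: rest, cur, acc =>
      if c = ' ' then pvSplit rest [] (cur.reverse :: acc)
      else pvSplit rest (c :: cur) acc

theorem pv_go_eq (fuel : Nat) (l cur : List Char) (acc : List (List Char))
    (h : l.length < fuel) :
    PySem.Chars.splitOn.go [' '] fuel l cur acc = pvSplit l cur acc := by
  induction fuel generalizing l cur acc with
  | zero => omega
  | succ n ih =>
    cases l with
    | nil => simp [PySem.Chars.splitOn.go, pvSplit]
    | cons c rest =>
      simp only [PySem.Chars.splitOn.go, pvSplit, List.isPrefixOf, Bool.and_true]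
      by_cases hc : c = ' '
      · subst hc
        rw [if_pos (by simp), if_pos rfl]
        simpa using ih rest [] (cur.reverse :: acc) (by simp at h ⊢; omega)
      · rw [if_neg (by simp [Ne.symm hc]), if_neg hc]
        exact ih rest (c :: cur) acc (by simp at h ⊢; omega)

theorem pv_splitOn_eq (l : List Char) :
    PySem.Chars.splitOn l [' '] = pvSplit l [] [] := by
  unfold PySem.Chars.splitOn
  exact pv_go_eq _ l [] [] (by omega)

-- the scan over the remaining chars computes 'any marker token' of the split
theorem pv_scan_split (l cur : List Char) (acc : List (List Char)) :
    (pvSplit l cur acc).any (PySem.Set.contains pvMarkers)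
      = (acc.any (PySem.Set.contains pvMarkers) || pvScan cur.reverse l) := by
  induction l generalizing cur acc with
  | nil => simp [pvSplit, pvScan, Bool.or_comm]
  | cons c rest ih =>
    by_cases hc : c = ' '
    · subst hc
      rw [show pvSplit (' ' :: rest) cur acc = pvSplit rest [] (cur.reverse :: acc) from by
            simp [pvSplit],
          ih, List.any_cons,
          show pvScan cur.reverse (' ' :: rest)
              = (PySem.Set.contains pvMarkers cur.reverse || pvScan [] rest) from by
            simp [pvScan, Bool.if_true_left]]
      show (PySem.Set.contains pvMarkers cur.reverse || _ || pvScan List.nil.reverse rest) = _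
      simp [Bool.or_comm, Bool.or_assoc]
    · simp only [pvSplit, pvScan, if_neg hc, ih, List.reverse_cons]

-- ===== VERDICT (by name: the statement is the Claim_ definition above) =====
theorem hasAMPM_spec : Claim_equal_hasAMPM := by
  intro text _
  unfold Spec_hasAMPM hasAMPM hasAMPM_alt
  rw [pv_foldl_step, Bool.false_or, funext pv_match_iff]
  show (pvTokens text).any _ = _
  rw [pvTokens, pv_splitOn_eq, pv_scan_split]
  simp [pvPunct]
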